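-- pv_equiv track=rewrite | github.com/SomilKSharma/AdvancedDSA | Prefixsum/goodsub.py | solve
-- ===== SOURCE A (Python) =====
-- def solve(A, B):
--
--     #get the counter
--     counter=0
--
--     #iterate for all elements in the array
--     for index_1 in range(len(A)):
--         sums=0
--         length=0
--         for index_2 in range(index_1,len(A)):
--             #sum the value in the index
--             sums=sums+A[index_2]
--             length=length+1
--             #check for good array
--             if (
--                 (length&1 and sums>B)
--                 or
--                 (not length&1 and sums<B)
--             ):
--                 counter+=1
--
--     return counter
-- ===== SOURCE B (Python) =====
-- def solve(A, B):
--     # Prefix sums with parity-partitioned threshold counting: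
--     # a subarray ending at prefix index j, starting at prefix index i, is good iff
--     # (j-i odd and P[j]-P[i] > B) or (j-i even and P[j]-P[i] < B).
--     ps = 0
--     same = [0]   # prefix values whose index parity equals the NEXT index's parity after swap
--     opp = []
--     counter = 0
--     for a in A:
--         ps += a
--         same, opp = opp, same
--         t = ps - B
--         counter += sum(1 for x in opp if x < t)    # odd-length subarrays
--         counter += sum(1 for x in same if x > t)   # even-length subarrays
--         same.append(ps)
--     return counter
-- ===== Notes on version B (the rewrite author's own statement) =====
-- stated objective: faster
-- what changed: Replaces A's nested start-index/end-index loops that re-accumulate each subarray's sum and length by a single left-to-right pass over prefix sums keeping two parity-partitioned lists of earlier prefix values and counting them against the threshold ps-B.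
import Mathlib
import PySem

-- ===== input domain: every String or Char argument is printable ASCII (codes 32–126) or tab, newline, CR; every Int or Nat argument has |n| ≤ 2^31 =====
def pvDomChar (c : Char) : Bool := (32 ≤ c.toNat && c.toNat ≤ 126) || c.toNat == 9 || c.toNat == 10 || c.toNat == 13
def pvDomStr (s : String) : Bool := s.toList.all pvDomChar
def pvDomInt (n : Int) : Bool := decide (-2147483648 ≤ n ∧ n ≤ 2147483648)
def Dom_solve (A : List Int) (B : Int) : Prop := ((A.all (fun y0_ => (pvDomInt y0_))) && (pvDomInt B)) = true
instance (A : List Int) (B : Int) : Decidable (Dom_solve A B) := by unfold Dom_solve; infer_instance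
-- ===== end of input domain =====

-- B replaces A's nested subarray-sum accumulation by one pass over prefix sums with two
-- parity-partitioned lists of earlier prefix values counted against a threshold; same O(n^2)
-- worst case, measured constant-factor faster in a timing run (objective: faster).

-- ===== PORT A =====
-- A: for each start index, accumulate sums/length over the suffix and count good subarrays.
def solve (A : List Int) (B : Int) : Int :=
  ((PySem.List.pyRange 0 (A.length : Int)).foldl (fun counter index_1 =>
    ((PySem.List.pyRange index_1 (A.length : Int)).foldl
      (fun (st : Int × Int × Int) index_2 =>
        let sums := st.1 + PySem.List.pyGetD A index_2 0
        let length := st.2.1 + 1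
        let counter :=
          if (PySem.Int.band length 1 ≠ 0 ∧ sums > B) ∨ (PySem.Int.band length 1 = 0 ∧ sums < B)
          then st.2.2 + 1 else st.2.2
        (sums, length, counter))
      (0, 0, counter)).2.2) 0)

-- ===== PORT B =====
-- B: one pass; state (ps, same, opp, counter); swap parity lists, count thresholds, append.
def solve_alt (A : List Int) (B : Int) : Int :=
  (A.foldl (fun (st : Int × List Int × List Int × Int) a =>
      let ps := st.1 + a
      let same := st.2.2.1   -- swapped: new same = old opp
      let opp := st.2.1      -- new opp = old same
      let t := ps - B
      let counter := st.2.2.2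
        + (opp.countP (fun x => x < t) : Int)
        + (same.countP (fun x => x > t) : Int)
      (ps, same ++ [ps], opp, counter))
    (0, [0], ([] : List Int), 0)).2.2.2

-- ===== PRECONDITION & SPEC =====
def Spec_solve (A : List Int) (B : Int) (out : Int) : Prop := out = solve_alt A B
instance (A : List Int) (B : Int) (out : Int) : Decidable (Spec_solve A B out) := by unfold Spec_solve; infer_instance

-- ===== CLAIM (what is proved, stated in full; the proofs are below) =====
def Claim_equal_solve : Prop := ∀ (A : List Int) (B : Int), Dom_solve A B → Spec_solve A B (solve A B)

-- ===== LEMMAS AND PROOFS =====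

def pfx (A : List Int) (k : Nat) : Int := ((A.take k).sum)
def cpair (A : List Int) (B : Int) (i j : Nat) : Int :=
  if i < j ∧ (if (j - i) % 2 = 1 then pfx A j - pfx A i > B else pfx A j - pfx A i < B)
  then 1 else 0
def cnt (A : List Int) (B : Int) (m : Nat) : Int :=
  ((List.range (m+1)).map (fun j => ((List.range j).map (fun i => cpair A B i j)).sum)).sum

theorem pfx_succ (A : List Int) (m : Nat) (h : m < A.length) :
    pfx A (m+1) = pfx A m + A.getD m 0 := by
  unfold pfx
  rw [List.take_add_one, List.sum_append, List.getElem?_eq_getElem h, List.getD_eq_getElem A 0 h]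
  simp

theorem cpair_zero_of_ge (A : List Int) (B : Int) (i j : Nat) (h : j ≤ i) :
    cpair A B i j = 0 := by
  simp only [cpair]
  exact if_neg (fun hh => absurd hh.1 (by omega))

theorem sum_cpair_zero (A : List Int) (B : Int) (i : Nat) (m : Nat) (h : m ≤ i + 1) :
    ((List.range m).map (fun j => cpair A B i j)).sum = 0 := by
  apply List.sum_eq_zero
  intro x hx
  rcases List.mem_map.mp hx with ⟨j, hj, rfl⟩
  exact cpair_zero_of_ge A B i j (by have := List.mem_range.mp hj; omega)

theorem inner_loop (A : List Int) (B : Int) (i : Nat) (c : Int) :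
    ∀ m : Nat, i ≤ m → m ≤ A.length →
    (PySem.List.pyRange (i : Int) (m : Int)).foldl
      (fun (st : Int × Int × Int) index_2 =>
        let sums := st.1 + PySem.List.pyGetD A index_2 0
        let length := st.2.1 + 1
        let counter :=
          if (PySem.Int.band length 1 ≠ 0 ∧ sums > B) ∨ (PySem.Int.band length 1 = 0 ∧ sums < B)
          then st.2.2 + 1 else st.2.2
        (sums, length, counter))
      (0, 0, c)
    = (pfx A m - pfx A i, ((m - i : Nat) : Int),
       c + ((List.range (m+1)).map (fun j => cpair A B i j)).sum) := by
  intro m h1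
  induction m, h1 using Nat.le_induction with
  | base =>
    intro _
    rw [PySem.List.pyRange_one_eq_nil le_rfl, sum_cpair_zero A B i (i+1) le_rfl]
    simp
  | succ m him ih =>
    intro h2
    have hmn : m < A.length := by omega
    have hcast : ((m+1 : Nat) : Int) = (m : Int) + 1 := by push_cast; ring
    rw [hcast, PySem.List.pyRange_one_succ_right (by exact_mod_cast him), List.foldl_append,
        ih (by omega)]
    simp only [List.foldl_cons, List.foldl_nil]
    have hsums : pfx A m - pfx A i + PySem.List.pyGetD A (m : Int) 0 = pfx A (m+1) - pfx A i := by
      rw [PySem.List.pyGetD_natCast A m 0, pfx_succ A m hmn]; ring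
    have hlen : ((m - i : Nat) : Int) + 1 = ((m + 1 - i : Nat) : Int) := by omega
    have hband : PySem.Int.band (((m - i : Nat) : Int) + 1) 1 = (((m - i + 1) % 2 : Nat) : Int) := by
      rw [hlen, show ((m + 1 - i : Nat) : Int) = ((m - i + 1 : Nat) : Int) by omega,
          show (1 : Int) = ((1 : Nat) : Int) from rfl, PySem.Int.band_natCast, Nat.and_one_is_mod]
    rw [hsums, hband, hlen]
    conv_rhs => rw [List.range_succ]
    simp only [List.map_append, List.sum_append, List.map_cons, List.map_nil, List.sum_cons,
      List.sum_nil, add_zero, Prod.mk.injEq]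
    refine ⟨trivial, trivial, ?_⟩
    have hcp : cpair A B i (m+1) =
        if ((((m - i + 1) % 2 : Nat) : Int) ≠ 0 ∧ pfx A (m+1) - pfx A i > B) ∨
           ((((m - i + 1) % 2 : Nat) : Int) = 0 ∧ pfx A (m+1) - pfx A i < B) then 1 else 0 := by
      simp only [cpair, show m + 1 - i = m - i + 1 by omega]
      rcases Nat.mod_two_eq_zero_or_one (m - i + 1) with h2 | h2 <;>
        rw [h2] <;> simp [him]
    rw [hcp]
    split_ifs <;> ring

theorem outer_loop (A : List Int) (B : Int) :
    ∀ k : Nat, k ≤ A.length →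
    ((List.map (fun k : Nat => (k : Int)) (List.range k)).foldl (fun counter index_1 =>
      ((PySem.List.pyRange index_1 (A.length : Int)).foldl
        (fun (st : Int × Int × Int) index_2 =>
          let sums := st.1 + PySem.List.pyGetD A index_2 0
          let length := st.2.1 + 1
          let counter :=
            if (PySem.Int.band length 1 ≠ 0 ∧ sums > B) ∨ (PySem.Int.band length 1 = 0 ∧ sums < B)
            then st.2.2 + 1 else st.2.2
          (sums, length, counter))
        (0, 0, counter)).2.2) 0)
    = ((List.range k).map (fun i =>
        ((List.range (A.length+1)).map (fun j => cpair A B i j)).sum)).sum := by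
  intro k
  induction k with
  | zero => simp
  | succ k ih =>
    intro hk
    rw [List.range_succ, List.map_append, List.map_append, List.foldl_append, ih (by omega),
        List.sum_append]
    simp only [List.map_cons, List.map_nil, List.foldl_cons, List.foldl_nil, List.sum_cons,
      List.sum_nil, add_zero]
    rw [inner_loop A B k _ A.length (by omega) le_rfl]

theorem sum_swap (A : List Int) (B : Int) :
    ((List.range A.length).map (fun i =>
      ((List.range (A.length+1)).map (fun j => cpair A B i j)).sum)).sum = cnt A B A.length := by
  show (∑ i ∈ Finset.range A.length, ∑ j ∈ Finset.range (A.length+1), cpair A B i j)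
      = ∑ j ∈ Finset.range (A.length+1), ∑ i ∈ Finset.range j, cpair A B i j
  have h1 : (∑ i ∈ Finset.range A.length, ∑ j ∈ Finset.range (A.length+1), cpair A B i j)
      = ∑ i ∈ Finset.range (A.length+1), ∑ j ∈ Finset.range (A.length+1), cpair A B i j := by
    rw [Finset.sum_range_succ]
    have : (∑ j ∈ Finset.range (A.length+1), cpair A B A.length j) = 0 := by
      apply Finset.sum_eq_zero
      intro j hj
      exact cpair_zero_of_ge A B _ j (by have := Finset.mem_range.mp hj; omega)
    rw [this, add_zero]
  rw [h1, Finset.sum_comm]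
  apply Finset.sum_congr rfl
  intro j hj
  symm
  have hsub : Finset.range j ⊆ Finset.range (A.length+1) :=
    by intro x hx
       have h1 := Finset.mem_range.mp hj
       simp only [Finset.mem_range] at *
       omega
  refine Finset.sum_subset hsub ?_
  intro i _ hi
  exact cpair_zero_of_ge A B i j (by simp [Finset.mem_range] at hi; omega)

theorem solve_eq_cnt (A : List Int) (B : Int) : solve A B = cnt A B A.length := by
  unfold solve
  rw [PySem.List.pyRange_zero_natCast]
  exact (outer_loop A B A.length le_rfl).trans (sum_swap A B)

def sameL (A : List Int) (k : Nat) : List Int :=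
  ((List.range (k+1)).filter (fun i => i % 2 == k % 2)).map (pfx A)
def oppL (A : List Int) (k : Nat) : List Int :=
  ((List.range (k+1)).filter (fun i => !(i % 2 == k % 2))).map (pfx A)

theorem parity_flip (i k : Nat) : (i % 2 == (k+1) % 2) = !(i % 2 == k % 2) := by
  rcases Nat.mod_two_eq_zero_or_one i with hi|hi <;> rcases Nat.mod_two_eq_zero_or_one k with hk|hk <;>
    simp [Nat.add_mod, hi, hk]

theorem sameL_succ (A : List Int) (k : Nat) :
    oppL A k ++ [pfx A (k+1)] = sameL A (k+1) := by
  unfold sameL oppL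
  conv_rhs => rw [List.range_succ, List.filter_append, List.map_append]
  have h1 : (List.range (k+1)).filter (fun i => i % 2 == (k+1) % 2)
      = (List.range (k+1)).filter (fun i => !(i % 2 == k % 2)) :=
    List.filter_congr (fun i _ => parity_flip i k)
  rw [h1]
  simp

theorem oppL_succ (A : List Int) (k : Nat) : sameL A k = oppL A (k+1) := by
  unfold sameL oppL
  conv_rhs => rw [List.range_succ, List.filter_append]
  have h1 : (List.range (k+1)).filter (fun i => !(i % 2 == (k+1) % 2))
      = (List.range (k+1)).filter (fun i => i % 2 == k % 2) :=
    List.filter_congr (fun i _ => by rw [parity_flip, Bool.not_not])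
  rw [h1]
  simp

theorem cnt_succ (A : List Int) (B : Int) (k : Nat) :
    cnt A B (k+1) = cnt A B k + ((List.range (k+1)).map (fun i => cpair A B i (k+1))).sum := by
  unfold cnt
  conv_lhs => rw [List.range_succ]
  simp

theorem count_step (A : List Int) (B : Int) (k : Nat) :
    ((sameL A k).countP (fun x => x < pfx A (k+1) - B) : Int)
    + ((oppL A k).countP (fun x => x > pfx A (k+1) - B) : Int)
    = ((List.range (k+1)).map (fun i => cpair A B i (k+1))).sum := by
  have hpt : ∀ i ∈ List.range (k+1), cpair A B i (k+1) =
      (if (decide (pfx A i < pfx A (k+1) - B) && (i % 2 == k % 2)) = true then (1:Int) else 0)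
      + (if (decide (pfx A (k+1) - B < pfx A i) && !(i % 2 == k % 2)) = true then (1:Int) else 0) := by
    intro i hi
    have hik : i ≤ k := by have := List.mem_range.mp hi; omega
    have hpar : (k + 1 - i) % 2 = 1 ↔ i % 2 = k % 2 := by omega
    simp only [cpair, Bool.and_eq_true, decide_eq_true_eq, Bool.not_eq_eq_eq_not,
      Bool.not_true, beq_iff_eq, beq_eq_false_iff_ne]
    by_cases hp : i % 2 = k % 2
    · have h2 : (k + 1 - i) % 2 = 1 := hpar.mpr hp
      simp only [h2, reduceIte]
      split_ifs <;> omega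
    · have h2 : ¬ ((k + 1 - i) % 2 = 1) := fun hc => hp (hpar.mp hc)
      simp only [if_neg h2]
      split_ifs <;> omega
  rw [List.map_congr_left hpt, PySem.List.sum_map_add_int,
      PySem.List.sum_map_ite_one_zero, PySem.List.sum_map_ite_one_zero]
  unfold sameL oppL
  rw [List.countP_map, List.countP_map, List.countP_filter, List.countP_filter]
  rfl

theorem alt_loop (A : List Int) (B : Int) :
    ∀ (l : List Int) (k : Nat), k ≤ A.length → A.drop k = l →
    ((l.foldl (fun (st : Int × List Int × List Int × Int) a =>
      let ps := st.1 + a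
      let same := st.2.2.1
      let opp := st.2.1
      let t := ps - B
      let counter := st.2.2.2
        + (opp.countP (fun x => x < t) : Int)
        + (same.countP (fun x => x > t) : Int)
      (ps, same ++ [ps], opp, counter))
      (pfx A k, sameL A k, oppL A k, cnt A B k)).2.2.2) = cnt A B A.length := by
  intro l
  induction l with
  | nil =>
    intro k hk hd
    have h1 : A.length ≤ k := List.drop_eq_nil_iff.mp hd
    have h2 : k = A.length := by omega
    subst h2
    rfl
  | cons a l ih =>
    intro k hk hd
    have hklt : k < A.length := by
      by_contra h
      rw [List.drop_eq_nil_of_le (by omega)] at hd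
      exact List.cons_ne_nil a l hd.symm
    have hget := List.drop_eq_getElem_cons hklt
    rw [hd] at hget
    have ha : a = A[k] := (List.cons.injEq a l _ _ ▸ hget).1
    have hl : A.drop (k+1) = l := ((List.cons.injEq a l _ _ ▸ hget).2).symm
    have hps : pfx A k + a = pfx A (k+1) := by
      rw [ha, pfx_succ A k hklt, List.getD_eq_getElem A 0 hklt]
    rw [List.foldl_cons]
    show ((l.foldl _ (pfx A k + a, oppL A k ++ [pfx A k + a], sameL A k,
        cnt A B k + ((sameL A k).countP (fun x => x < pfx A k + a - B) : Int)
          + ((oppL A k).countP (fun x => x > pfx A k + a - B) : Int))).2.2.2) = cnt A B A.length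
    rw [hps, add_assoc, count_step, ← cnt_succ, oppL_succ, sameL_succ]
    exact ih (k+1) (by omega) hl

theorem solve_alt_eq_cnt (A : List Int) (B : Int) : solve_alt A B = cnt A B A.length := by
  unfold solve_alt
  have h0 : ((0 : Int), ([0] : List Int), ([] : List Int), (0 : Int))
      = (pfx A 0, sameL A 0, oppL A 0, cnt A B 0) := by
    simp [pfx, sameL, oppL, cnt, List.range_succ]
  rw [h0]
  exact alt_loop A B A 0 (by omega) (by simp)

-- ===== VERDICT (by name: the statement is the Claim_ definition above) =====
theorem solve_spec : Claim_equal_solve := by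
  intro A B _
  unfold Spec_solve
  rw [solve_eq_cnt, solve_alt_eq_cnt]
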